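-- pv_equiv track=rewrite | github.com/CITCOM-project/causal-cut-replication | water_g_preproc.py | setup_xo_t_do
-- ===== SOURCE A (Python) =====
-- def setup_xo_t_do(strategy_assigned, strategy_followed):
--     censored = False
--     result = []
--     for x, y in zip(strategy_assigned, strategy_followed):
--         if censored:
--             result.append(None)
--         else:
--             result.append((not censored) and x != y)
--             censored = x != y
--     # First and last can't be censored
--     return [0] + [int(x) if x is not None else None for x in result] + [0 if result[-1] is not None else None]
-- ===== SOURCE B (Python) =====
-- def setup_xo_t_do(strategy_assigned, strategy_followed):
--     pairs = list(zip(strategy_assigned, strategy_followed))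
--     n = len(pairs)
--     k = next((i for i, (x, y) in enumerate(pairs) if x != y), None)
--     if k is None:
--         body = [0] * n
--         tail = 0
--     else:
--         body = [0] * k + [1] + [None] * (n - k - 1)
--         tail = 0 if k == n - 1 else None
--     return [0] + body + [tail]
-- ===== Notes on version B (the rewrite author's own statement) =====
-- stated objective: simpler
-- what changed: Replaced A's stateful boolean-flag loop that appends per-element (then post-maps bools to ints) by finding the index of the first disagreement and emitting the whole answer in closed form from replicated segments.
import Mathlib
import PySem

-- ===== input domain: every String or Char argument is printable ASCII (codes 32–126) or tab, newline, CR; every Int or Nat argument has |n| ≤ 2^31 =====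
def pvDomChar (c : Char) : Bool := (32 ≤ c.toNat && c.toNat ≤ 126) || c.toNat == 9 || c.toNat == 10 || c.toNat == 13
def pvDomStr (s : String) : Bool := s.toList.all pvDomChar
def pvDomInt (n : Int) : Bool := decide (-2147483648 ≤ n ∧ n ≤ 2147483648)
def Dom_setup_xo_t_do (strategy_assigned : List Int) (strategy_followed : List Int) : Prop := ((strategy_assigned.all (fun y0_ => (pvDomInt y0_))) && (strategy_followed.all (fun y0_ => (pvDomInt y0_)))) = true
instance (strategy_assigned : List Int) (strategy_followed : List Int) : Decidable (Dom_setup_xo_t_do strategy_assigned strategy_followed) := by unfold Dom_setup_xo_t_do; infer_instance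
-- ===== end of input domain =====

-- B rewrites A's stateful accumulation as: find the first disagreeing index, then emit
-- the list in closed form (objective: simpler); return value only, no side effects.

-- ===== PORT A =====
-- loop body of A: state = (censored, result); result entries are Python bool-or-None
def pvStepA (s : Bool × List (Option Bool)) (p : Int × Int) : Bool × List (Option Bool) :=
  if s.1 then (s.1, s.2 ++ [none])
  else (decide (p.1 ≠ p.2), s.2 ++ [some (decide (p.1 ≠ p.2))])

def setup_xo_t_do (strategy_assigned : List Int) (strategy_followed : List Int) : List (Option Int) :=
  let result := ((strategy_assigned.zip strategy_followed).foldl pvStepA (false, [])).2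
  -- result[-1] raises IndexError when result is empty (excluded by Pre_)
  [(some 0 : Option Int)] ++ result.map (fun x => x.map (fun b => if b then (1 : Int) else 0)) ++
    [(match PySem.List.pyGet? result (-1) with
      | some (some _) => some 0
      | _ => none : Option Int)]

-- ===== PORT B =====
def setup_xo_t_do_alt (strategy_assigned : List Int) (strategy_followed : List Int) : List (Option Int) :=
  let pairs := strategy_assigned.zip strategy_followed
  match pairs.findIdx? (fun p => p.1 != p.2) with
  | none => some 0 :: (List.replicate pairs.length (some 0) ++ [some 0])
  | some k => some 0 :: ((List.replicate k (some 0) ++ some 1 :: List.replicate (pairs.length - k - 1) none)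
                ++ [if k = pairs.length - 1 then some 0 else none])

-- ===== PRECONDITION & SPEC =====
-- A evaluates result[-1]; when zip(strategy_assigned, strategy_followed) is empty (either list
-- empty) this raises IndexError, so exactly those inputs are excluded.
def Pre_setup_xo_t_do (strategy_assigned : List Int) (strategy_followed : List Int) : Prop :=
  strategy_assigned ≠ [] ∧ strategy_followed ≠ []
instance (strategy_assigned : List Int) (strategy_followed : List Int) : Decidable (Pre_setup_xo_t_do strategy_assigned strategy_followed) := by unfold Pre_setup_xo_t_do; infer_instance
def pvWitness_setup_xo_t_do : List Int × List Int := ([1, 2, 3], [1, 0, 3])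

def Spec_setup_xo_t_do (strategy_assigned : List Int) (strategy_followed : List Int) (out : List (Option Int)) : Prop := out = setup_xo_t_do_alt strategy_assigned strategy_followed
instance (strategy_assigned : List Int) (strategy_followed : List Int) (out : List (Option Int)) : Decidable (Spec_setup_xo_t_do strategy_assigned strategy_followed out) := by unfold Spec_setup_xo_t_do; infer_instance

-- ===== CLAIM (what is proved, stated in full; the proofs are below) =====
def Claim_equal_setup_xo_t_do : Prop := ∀ (strategy_assigned : List Int) (strategy_followed : List Int), Dom_setup_xo_t_do strategy_assigned strategy_followed → Pre_setup_xo_t_do strategy_assigned strategy_followed → Spec_setup_xo_t_do strategy_assigned strategy_followed (setup_xo_t_do strategy_assigned strategy_followed)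
-- ===== LEMMAS AND PROOFS =====

-- once censored, the loop only appends None
lemma foldA_true (l : List (Int × Int)) : ∀ acc : List (Option Bool),
    l.foldl pvStepA (true, acc) = (true, acc ++ List.replicate l.length none) := by
  induction l with
  | nil => simp
  | cons p t ih =>
    intro acc
    simp only [List.foldl_cons, pvStepA, if_true]
    rw [ih]
    simp [List.replicate_succ]

-- an uncensored run's result does not depend on the accumulator prefix
lemma foldA_shift (m : List (Int × Int)) : ∀ acc : List (Option Bool),
    (m.foldl pvStepA (false, acc)).2 = acc ++ (m.foldl pvStepA (false, [])).2 := by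
  induction m with
  | nil => simp
  | cons q s ihs =>
    intro acc
    by_cases hq : q.1 = q.2
    · have hd : (decide (q.1 ≠ q.2)) = false := by simp [hq]
      simp only [List.foldl_cons, pvStepA, hd]
      simp only [Bool.false_eq_true, if_false, List.nil_append]
      rw [ihs, ihs [some false]]
      simp
    · have hd : (decide (q.1 ≠ q.2)) = true := by simp [hq]
      simp only [List.foldl_cons, pvStepA, hd]
      simp only [Bool.false_eq_true, if_false]
      rw [foldA_true, foldA_true]
      simp

-- characterization of A's accumulated result in terms of the first disagreeing index
lemma resA_char (l : List (Int × Int)) :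
    (l.foldl pvStepA (false, [])).2 =
      match l.findIdx? (fun p => p.1 != p.2) with
      | none => List.replicate l.length (some false)
      | some k => List.replicate k (some false) ++ some true :: List.replicate (l.length - k - 1) none := by
  induction l with
  | nil => simp
  | cons p t ih =>
    by_cases h : p.1 = p.2
    · have hd : (decide (p.1 ≠ p.2)) = false := by simp [h]
      simp only [List.foldl_cons, pvStepA, hd]
      simp only [Bool.false_eq_true, if_false, List.nil_append]
      rw [foldA_shift, ih]
      simp only [List.findIdx?_cons, show ((fun p : Int × Int => p.1 != p.2) p = false) by simp [h]]
      simp only [Bool.false_eq_true, if_false]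
      cases hfi : t.findIdx? (fun q => q.1 != q.2) with
      | none => simp [List.replicate_succ]
      | some k =>
        simp only [Option.map_some, List.length_cons]
        rw [List.replicate_succ]
        simp [Nat.add_sub_add_right]
    · have hd : (decide (p.1 ≠ p.2)) = true := by simp [h]
      simp only [List.foldl_cons, pvStepA, hd]
      simp only [Bool.false_eq_true, if_false, List.nil_append]
      rw [foldA_true]
      simp [List.findIdx?_cons, h]

lemma findIdx_lt_length : ∀ (l : List (Int × Int)) (k : Nat),
    l.findIdx? (fun p => p.1 != p.2) = some k → k < l.length := by
  intro l
  induction l with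
  | nil => simp
  | cons p t ih =>
    intro k h
    rw [List.findIdx?_cons] at h
    by_cases hp : (p.1 != p.2) = true
    · simp [hp] at h
      simp only [List.length_cons]
      omega
    · rw [Bool.not_eq_true] at hp
      simp only [hp, Bool.false_eq_true, if_false] at h
      rcases Option.map_eq_some_iff.mp h with ⟨j, hj, rfl⟩
      have := ih j hj
      simp
      omega

-- ===== VERDICT (by name: the statement is the Claim_ definition above) =====
theorem setup_xo_t_do_spec : Claim_equal_setup_xo_t_do := by
  intro a b _ hpre
  unfold Spec_setup_xo_t_do setup_xo_t_do setup_xo_t_do_alt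
  have hz : a.zip b ≠ [] := by
    rcases hpre with ⟨ha, hb⟩
    cases a with
    | nil => exact absurd rfl ha
    | cons x xs => cases b with
      | nil => exact absurd rfl hb
      | cons y ys => simp
  set l := a.zip b with hl
  rw [resA_char]
  cases hfi : l.findIdx? (fun p => p.1 != p.2) with
  | none =>
    have hn : 0 < l.length := List.length_pos_iff.mpr hz
    simp only [hfi]
    have hlast : PySem.List.pyGet? (List.replicate l.length (some false : Option Bool)) (-1)
        = some (some false) := by
      rw [PySem.List.pyGet?_neg_one]
      cases hcase : l.length with
      | zero => omega
      | succ m => simp [List.replicate_succ', List.getLast?_append]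
    simp [hlast, List.map_replicate]
  | some k =>
    have hk : k < l.length := findIdx_lt_length l k hfi
    simp only [hfi]
    by_cases hke : k = l.length - 1
    · have hrep : l.length - k - 1 = 0 := by omega
      rw [hrep, if_pos hke]
      simp [PySem.List.pyGet?_neg_one, List.getLast?_append, List.map_replicate]
    · have hrep : 0 < l.length - k - 1 := by omega
      have hlast : PySem.List.pyGet?
          (List.replicate k (some false : Option Bool) ++ some true :: List.replicate (l.length - k - 1) none) (-1)
          = some none := by
        rw [PySem.List.pyGet?_neg_one]
        cases hcase : l.length - k - 1 with
        | zero => omega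
        | succ m =>
          rw [List.replicate_succ',
            show (List.replicate k (some false : Option Bool) ++ (some true :: (List.replicate m none ++ [none])))
              = (List.replicate k (some false) ++ some true :: List.replicate m none) ++ [none] by simp]
          exact List.getLast?_concat
      simp [hlast, hke, List.map_replicate]
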